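-- pv_equiv track=rewrite | github.com/supriya-project/supriya | supriya/utils.py | iterate_nwise
-- ===== SOURCE A (Python) =====
-- import itertools
-- from typing import (
--     Generator,
--     Generic,
--     Iterable,
--     Sequence,
--     Type,
--     TypeVar,
--     Union,
--     cast,
-- )
--
-- T = TypeVar("T")
--
-- def iterate_nwise(
--     iterable: Iterable[T], n: int = 2
-- ) -> Generator[Sequence[T], None, None]:
--     iterables = itertools.tee(iterable, n)
--     temp: list[Iterable[T]] = []
--     for idx, it in enumerate(iterables):
--         it = itertools.islice(it, idx, None)
--         temp.append(it)
--     yield from zip(*temp)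
-- ===== SOURCE B (Python) =====
-- import itertools
-- from collections import deque
--
--
-- def iterate_nwise(iterable, n=2):
--     # Single-pass sliding window over one bounded deque; no windows of width zero.
--     if n == 0:
--         return
--     it = iter(iterable)
--     window = deque(itertools.islice(it, n), maxlen=n)
--     if len(window) == n:
--         yield tuple(window)
--     for x in it:
--         window.append(x)
--         yield tuple(window)
-- ===== Notes on version B (the rewrite author's own statement) =====
-- stated objective: idiomatic
-- what changed: Replaced the tee-n-copies + per-copy islice + zip(*...) construction with the classic single-pass sliding window over one bounded deque (prime with the first n items, then append-and-yield).
import Mathlib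
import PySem

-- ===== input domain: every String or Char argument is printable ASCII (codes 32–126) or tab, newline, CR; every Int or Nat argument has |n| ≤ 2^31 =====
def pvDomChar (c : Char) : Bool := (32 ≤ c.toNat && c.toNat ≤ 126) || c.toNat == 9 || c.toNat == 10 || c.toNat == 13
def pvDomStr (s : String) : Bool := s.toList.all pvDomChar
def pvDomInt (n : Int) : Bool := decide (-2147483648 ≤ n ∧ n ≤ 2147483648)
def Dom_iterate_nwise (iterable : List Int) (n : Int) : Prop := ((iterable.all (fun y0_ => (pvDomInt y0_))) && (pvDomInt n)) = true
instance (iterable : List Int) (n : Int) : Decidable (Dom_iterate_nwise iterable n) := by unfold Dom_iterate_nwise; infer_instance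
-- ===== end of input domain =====

-- B replaces A's tee/islice/zip(*...) construction with a single-pass bounded sliding window (idiomatic form).

-- ===== PORT A =====
-- zip(*lists): while every argument list is nonempty, emit the tuple of heads and
-- continue with the tails; zip() of no arguments yields nothing.
def pyZipN (ls : List (List Int)) : List (List Int) :=
  match ls with
  | [] => []
  | l :: rest =>
    if (l :: rest).all (fun t => !t.isEmpty) then
      ((l :: rest).map (fun t => t.headD 0)) :: pyZipN ((l :: rest).map List.tail)
    else []
termination_by (ls.headD []).length
decreasing_by
  simp_all [List.all_cons]
  cases l with
  | nil => simp at *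
  | cons a t => simp

-- A: tee n copies of the iterable; islice the idx-th copy from idx (= drop idx); zip them all.
def iterate_nwise (iterable : List Int) (n : Int) : List (List Int) :=
  pyZipN ((List.range n.toNat).map (fun idx => iterable.drop idx))

-- ===== PORT B =====
-- B: no windows of width zero; otherwise prime a bounded window with the first n items
-- (deque(islice(it, n), maxlen=n)), yield it if full, then for each remaining x append
-- (evicting the oldest = tail ++ [x]) and yield the window.
def iterate_nwise_alt (iterable : List Int) (n : Int) : List (List Int) :=
  if n = 0 then []
  else
    let k := n.toNat
    let w := iterable.take k
    let rest := iterable.drop k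
    if w.length = k then
      (rest.foldl
        (fun (acc : List (List Int) × List Int) x =>
          let w' := acc.2.tail ++ [x]
          (acc.1 ++ [w'], w'))
        ([w], w)).1
    else []

-- ===== PRECONDITION & SPEC =====
-- Pre_ excludes only n < 0, where Python A raises ValueError (itertools.tee) and B raises ValueError too (deque maxlen).
def Pre_iterate_nwise (iterable : List Int) (n : Int) : Prop := 0 ≤ n
instance (iterable : List Int) (n : Int) : Decidable (Pre_iterate_nwise iterable n) := by unfold Pre_iterate_nwise; infer_instance
def pvWitness_iterate_nwise : List Int × Int := ([1, 2, 3, 4], 2)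

def Spec_iterate_nwise (iterable : List Int) (n : Int) (out : List (List Int)) : Prop := out = iterate_nwise_alt iterable n
instance (iterable : List Int) (n : Int) (out : List (List Int)) : Decidable (Spec_iterate_nwise iterable n out) := by unfold Spec_iterate_nwise; infer_instance

-- ===== CLAIM (what is proved, stated in full; the proofs are below) =====
def Claim_equal_iterate_nwise : Prop := ∀ (iterable : List Int) (n : Int), Dom_iterate_nwise iterable n → Pre_iterate_nwise iterable n → Spec_iterate_nwise iterable n (iterate_nwise iterable n)

-- ===== LEMMAS AND PROOFS =====

theorem pyZipN_cons (l : List Int) (rest : List (List Int)) :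
    pyZipN (l :: rest) =
      if (l :: rest).all (fun t => !t.isEmpty) then
        ((l :: rest).map (fun t => t.headD 0)) :: pyZipN ((l :: rest).map List.tail)
      else [] := by rw [pyZipN]

theorem cond_eq (xs : List Int) (k : Nat) (hk : 1 ≤ k) :
    ((List.range k).map (fun i => xs.drop i)).all (fun t => !t.isEmpty)
      = decide (k ≤ xs.length) := by
  simp
  by_cases h : k ≤ xs.length
  · simp [h]; intro i hi; omega
  · simp [h]; exact ⟨k - 1, by omega, by omega⟩

theorem heads_eq (xs : List Int) (k : Nat) (h : k ≤ xs.length) :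
    ((List.range k).map (fun i => (xs.drop i).headD 0)) = xs.take k := by
  apply List.ext_getElem
  · simp; omega
  · intro j h1 h2
    simp only [List.getElem_map, List.getElem_range, List.headD_eq_head?, List.head?_drop,
      List.getElem_take]
    rw [List.getElem?_eq_getElem (by simp at h2; omega)]
    simp

theorem tails_eq (xs : List Int) (k : Nat) :
    (((List.range k).map (fun i => xs.drop i)).map List.tail)
      = (List.range k).map (fun i => xs.tail.drop i) := by
  simp only [List.map_map]
  apply List.map_congr_left
  intro i _
  simp [Function.comp, List.tail_drop, List.drop_tail]

theorem zipN_drops (xs : List Int) (k : Nat) (hk : 1 ≤ k) :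
    pyZipN ((List.range k).map (fun i => xs.drop i)) =
      if k ≤ xs.length then xs.take k :: pyZipN ((List.range k).map (fun i => xs.tail.drop i)) else [] := by
  obtain ⟨m, rfl⟩ : ∃ m, k = m + 1 := ⟨k - 1, by omega⟩
  have A : (List.range (m+1)).map (fun i => xs.drop i)
      = xs.drop 0 :: ((List.range m).map Nat.succ).map (fun i => xs.drop i) := by
    rw [List.range_succ_eq_map, List.map_cons]
  rw [A, pyZipN_cons, ← A, cond_eq _ _ hk, tails_eq]
  by_cases h : m + 1 ≤ xs.length
  · rw [if_pos (by simp [h]), if_pos h]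
    congr 1
    rw [List.map_map]
    refine Eq.trans ?_ (heads_eq xs (m+1) h)
    apply List.map_congr_left
    intro i _
    rfl
  · rw [if_neg (by simp [h]), if_neg h]

-- reference form: the list of all k-windows of xs
def wins (xs : List Int) (k : Nat) : List (List Int) :=
  if h : 1 ≤ k ∧ k ≤ xs.length then xs.take k :: wins xs.tail k else []
termination_by xs.length
decreasing_by
  cases xs with
  | nil => simp at h; omega
  | cons a t => simp

theorem wins_eq (xs : List Int) (k : Nat) :
    wins xs k = if 1 ≤ k ∧ k ≤ xs.length then xs.take k :: wins xs.tail k else [] := by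
  rw [wins]; split <;> simp_all

theorem zipN_eq_wins (k : Nat) (hk : 1 ≤ k) :
    ∀ xs : List Int, pyZipN ((List.range k).map (fun i => xs.drop i)) = wins xs k := by
  intro xs
  induction xs with
  | nil =>
    rw [zipN_drops _ _ hk, wins_eq]
    simp only [List.length_nil]
    rw [if_neg (by omega), if_neg (by omega)]
  | cons a t ih =>
    rw [zipN_drops _ _ hk, wins_eq]
    by_cases h : k ≤ (a :: t).length
    · rw [if_pos h, if_pos ⟨hk, h⟩]
      simp only [List.tail_cons]
      rw [ih]
    · rw [if_neg h, if_neg (by tauto)]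

-- the windows emitted by B's loop after the initial full window w
def winsFrom (w : List Int) (rest : List Int) : List (List Int) :=
  match rest with
  | [] => []
  | x :: r => (w.tail ++ [x]) :: winsFrom (w.tail ++ [x]) r

theorem fold_eq_winsFrom (rest : List Int) (pre : List (List Int)) (w : List Int) :
    (rest.foldl
      (fun (acc : List (List Int) × List Int) x =>
        let w' := acc.2.tail ++ [x]
        (acc.1 ++ [w'], w'))
      (pre, w)).1 = pre ++ winsFrom w rest := by
  induction rest generalizing pre w with
  | nil => simp [winsFrom]
  | cons x r ih => simp [winsFrom, ih, List.append_assoc]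

theorem winsFrom_eq (k : Nat) (hk : 1 ≤ k) :
    ∀ xs : List Int, k ≤ xs.length →
      winsFrom (xs.take k) (xs.drop k) = wins xs.tail k := by
  obtain ⟨m, rfl⟩ : ∃ m, k = m + 1 := ⟨k - 1, by omega⟩
  intro xs
  induction xs with
  | nil => intro h; simp at h
  | cons a t ih =>
    intro hlen
    simp only [List.tail_cons]
    by_cases h : m + 1 ≤ t.length
    · have hm : m < t.length := by omega
      have hdrop : (a :: t).drop (m + 1) = t[m] :: t.drop (m + 1) := by
        rw [List.drop_succ_cons, List.drop_eq_getElem_cons hm]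
      have htake : (a :: t).take (m + 1) = a :: t.take m := by
        rw [List.take_succ_cons]
      rw [hdrop, htake, winsFrom]
      have hwin : (a :: t.take m).tail ++ [t[m]] = t.take (m + 1) := by
        rw [List.take_add_one, List.getElem?_eq_getElem hm]
        simp
      rw [hwin, ih h]
      conv_rhs => rw [wins_eq, if_pos (⟨hk, h⟩ : 1 ≤ m + 1 ∧ m + 1 ≤ t.length)]
    · have hdrop : (a :: t).drop (m + 1) = [] := by
        rw [List.drop_succ_cons, List.drop_eq_nil_iff]; omega
      rw [hdrop, winsFrom, wins_eq, if_neg (by simp; omega)]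

-- ===== VERDICT (by name: the statement is the Claim_ definition above) =====
theorem iterate_nwise_spec : Claim_equal_iterate_nwise := by
  intro iterable n _ hpre
  unfold Spec_iterate_nwise iterate_nwise iterate_nwise_alt
  by_cases h0 : n = 0
  · simp [h0, pyZipN]
  · have hk : 1 ≤ n.toNat := by unfold Pre_iterate_nwise at hpre; omega
    simp only [if_neg h0]
    rw [zipN_eq_wins _ hk]
    by_cases hlen : n.toNat ≤ iterable.length
    · simp only [List.length_take, Nat.min_eq_left hlen]
      rw [fold_eq_winsFrom, winsFrom_eq _ hk _ hlen, wins_eq]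
      simp [hk, hlen]
    · have hne : ¬ (iterable.take n.toNat).length = n.toNat := by
        simp [List.length_take]; omega
      rw [wins_eq]
      simp [hk, hlen]
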